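-- pv_equiv track=rewrite | github.com/Cvillas91/myPython | codeWars/6kyu.py | encrypt_this
-- ===== SOURCE A (Python) =====
-- def encrypt_this(t):
--     if t == "": return ""
--     a = t.split(" ")
--     fin = []
--     for el in a:
--         if len(el) == 1:
--             fin.append(str(ord(el)))
--         elif len(el) == 2:
--             fin.append(str(ord(el[0])) + el[1])
--         else:
--             word = str(ord(el[0])) + el[-1] + el[2:-1] + el[1]
--             fin.append(word)
--     return " ".join(fin)
-- ===== SOURCE B (Python) =====
-- def _emit(word, res):
--     n = len(word)
--     res.append(str(ord(word[0])))
--     for i in range(1, n):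
--         j = n - 1 if i == 1 else (1 if i == n - 1 else i)
--         res.append(word[j])
--
-- def encrypt_this(t):
--     if t == "": return ""
--     res = []
--     word = []
--     for ch in t:
--         if ch == " ":
--             _emit(word, res)
--             res.append(" ")
--             word = []
--         else:
--             word.append(ch)
--     _emit(word, res)
--     return "".join(res)
-- ===== Notes on version B (the rewrite author's own statement) =====
-- stated objective: alternative
-- what changed: Replaced split/branch-per-length/join with a single character-level scan that accumulates the current word and flushes it through an index-permutation encoder (position 1 maps to n-1, n-1 to 1, others fixed) appending pieces directly to the output list.
import Mathlib
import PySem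

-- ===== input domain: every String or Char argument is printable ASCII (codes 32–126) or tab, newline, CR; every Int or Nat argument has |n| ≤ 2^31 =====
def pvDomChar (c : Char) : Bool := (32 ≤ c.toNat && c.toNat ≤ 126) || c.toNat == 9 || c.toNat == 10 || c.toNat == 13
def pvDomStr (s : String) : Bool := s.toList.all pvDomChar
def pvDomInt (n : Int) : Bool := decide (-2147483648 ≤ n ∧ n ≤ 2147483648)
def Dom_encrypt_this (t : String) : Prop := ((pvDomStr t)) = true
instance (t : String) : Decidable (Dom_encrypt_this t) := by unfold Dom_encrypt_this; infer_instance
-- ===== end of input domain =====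

-- B replaces A's split/length-branch/join pipeline with one character-level scan that flushes each word through an index-permutation encoder; objective: alternative.


-- ===== PORT A =====
-- per-word body of A's loop (the three length branches); the [] in a dead match arm marks where
-- Python raises on an empty word (those inputs are excluded by Pre_)
def encAWord (el : List Char) : List Char :=
  if el.length = 1 then
    PySem.Int.toChars ((el.headD ' ').toNat : Int)          -- str(ord(el)); headD is safe: length = 1
  else if el.length = 2 then
    match PySem.List.pyGet? el 0, PySem.List.pyGet? el 1 with
    | some c0, some c1 => PySem.Int.toChars (c0.toNat : Int) ++ [c1]   -- str(ord(el[0])) + el[1]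
    | _, _ => []
  else
    match PySem.List.pyGet? el 0, PySem.List.pyGet? el (-1), PySem.List.pyGet? el 1 with
    | some c0, some clast, some c1 =>                       -- str(ord(el[0])) + el[-1] + el[2:-1] + el[1]
        PySem.Int.toChars (c0.toNat : Int) ++ [clast] ++ PySem.List.slice el (some 2) (some (-1)) ++ [c1]
    | _, _, _ => []

def encrypt_this (t : String) : String :=
  if t == "" then ""
  else
    let a : List (List Char) := (PySem.Chars.split? t.toList [' ']).getD []   -- t.split(" "); sep ≠ "" so never none
    let fin : List (List Char) := a.foldl (fun acc el => acc ++ [encAWord el]) []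
    String.ofList (PySem.Chars.join [' '] fin)              -- " ".join(fin)

-- ===== PORT B =====
-- _emit(word, res): appends str(ord(word[0])) and then word[j] for i in range(1, n),
-- j the swap permutation 1 ↔ n-1; pyGet? word 0 = none marks Python's IndexError on an
-- empty word (excluded by Pre_); the inner indices j are always in range so pyGetD is exact
def emitB (word res : List Char) : List Char :=
  match PySem.List.pyGet? word 0 with
  | none => res
  | some c0 =>
    let n : Int := PySem.List.len word
    (PySem.List.pyRange 1 n).foldl
      (fun acc i =>
        acc ++ [PySem.List.pyGetD word (if i = 1 then n - 1 else if i = n - 1 then 1 else i) ' '])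
      (res ++ PySem.Int.toChars (c0.toNat : Int))

-- the for-loop over the characters of t, carrying (res, word)
def scanB : List Char → List Char × List Char → List Char × List Char
  | [], st => st
  | ch :: cs, st =>
      scanB cs (if ch = ' ' then (emitB st.2 st.1 ++ [' '], ([] : List Char)) else (st.1, st.2 ++ [ch]))

def encrypt_this_alt (t : String) : String :=
  if t == "" then ""
  else
    let st := scanB t.toList (([] : List Char), ([] : List Char))
    String.ofList (emitB st.2 st.1)

-- ===== PRECONDITION & SPEC =====
-- Pre_ excludes only strings whose split on the single-space separator contains an empty word (leading, trailing or doubled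
-- spaces): there BOTH A and B raise on the empty word (ord/indexing), so A returns nothing.
def Pre_encrypt_this (t : String) : Prop :=
  t = "" ∨ ∀ w ∈ (PySem.Chars.split? t.toList [' ']).getD [], w ≠ []
instance (t : String) : Decidable (Pre_encrypt_this t) := by unfold Pre_encrypt_this; infer_instance
def pvWitness_encrypt_this : String := "Hello world"
def Spec_encrypt_this (t : String) (out : String) : Prop := out = encrypt_this_alt t
instance (t : String) (out : String) : Decidable (Spec_encrypt_this t out) := by unfold Spec_encrypt_this; infer_instance

-- ===== CLAIM (what is proved, stated in full; the proofs are below) =====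
def Claim_equal_encrypt_this : Prop := ∀ (t : String), Dom_encrypt_this t → Pre_encrypt_this t → Spec_encrypt_this t (encrypt_this t)

-- ===== LEMMAS AND PROOFS =====

-- proof-side mirror of splitting on a single space
def mySplit : List Char → List (List Char)
  | [] => [[]]
  | c :: rest =>
      if c = ' ' then [] :: mySplit rest
      else
        match mySplit rest with
        | [] => [[c]]
        | h :: tl => (c :: h) :: tl

def prependHead (p : List Char) : List (List Char) → List (List Char)
  | [] => [p]
  | h :: tl => (p ++ h) :: tl

theorem mySplit_ne_nil (cs : List Char) : mySplit cs ≠ [] := by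
  cases cs with
  | nil => simp [mySplit]
  | cons c rest =>
    simp only [mySplit]
    split_ifs
    · simp
    · cases h : mySplit rest <;> simp

theorem go_spec (fuel : Nat) : ∀ (l cur : List Char) (acc : List (List Char)),
    l.length < fuel →
    PySem.Chars.splitOn.go [' '] fuel l cur acc = acc.reverse ++ prependHead cur.reverse (mySplit l) := by
  induction fuel with
  | zero => intro l cur acc h; omega
  | succ fuel ih =>
    intro l cur acc h
    cases l with
    | nil =>
      rw [PySem.Chars.splitOn.go]
      simp [mySplit, prependHead]
      omega
    | cons c rest =>
      rw [PySem.Chars.splitOn.go]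
      by_cases hc : c = ' '
      · subst hc
        simp only [List.isPrefixOf, BEq.rfl, Bool.true_and, if_true,
          List.length_cons, List.length_nil, List.drop_succ_cons, List.drop_zero]
        rw [ih rest [] (cur.reverse :: acc) (by simpa using Nat.lt_of_succ_lt_succ h)]
        simp [mySplit]
        cases hm : mySplit rest with
        | nil => exact absurd hm (mySplit_ne_nil rest)
        | cons hh tl => simp [prependHead]
      · have : ([' '].isPrefixOf (c :: rest)) = false := by
          simp [List.isPrefixOf]
          exact fun hh => absurd hh.symm hc
        rw [this]
        simp only [Bool.false_eq_true, if_false]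
        rw [ih rest (c :: cur) acc (by simpa using Nat.lt_of_succ_lt_succ h)]
        simp only [mySplit, hc, if_false, List.reverse_cons]
        cases hm : mySplit rest with
        | nil => exact absurd hm (mySplit_ne_nil rest)
        | cons hh tl => simp [prependHead]

theorem splitOn_space (cs : List Char) : PySem.Chars.splitOn cs [' '] = mySplit cs := by
  unfold PySem.Chars.splitOn
  rw [go_spec (cs.length + 1) cs [] [] (by omega)]
  cases hm : mySplit cs with
  | nil => exact absurd hm (mySplit_ne_nil cs)
  | cons hh tl => simp [prependHead]

-- emitB writes after res: emitB word res = res ++ emitB word []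
theorem emitB_append (word res : List Char) : emitB word res = res ++ emitB word [] := by
  unfold emitB
  cases h : PySem.List.pyGet? word 0 with
  | none => simp
  | some c0 =>
    simp only [PySem.List.foldl_append_singleton_eq_map, List.nil_append, List.append_assoc]

-- the scanner computes the joined encodings of the words
theorem scan_spec (cs : List Char) : ∀ (res word : List Char),
    emitB (scanB cs (res, word)).2 (scanB cs (res, word)).1
      = res ++ PySem.Chars.join [' '] ((prependHead word (mySplit cs)).map (fun w => emitB w [])) := by
  induction cs with
  | nil =>
    intro res word
    simp only [scanB]
    rw [emitB_append]
    simp [mySplit, prependHead, PySem.Chars.join_singleton]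
  | cons ch cs ih =>
    intro res word
    by_cases hc : ch = ' '
    · subst hc
      simp only [scanB]
      rw [if_pos trivial, ih (emitB word res ++ [' ']) []]
      have hpre : prependHead [] (mySplit cs) = mySplit cs := by
        cases hm : mySplit cs with
        | nil => exact absurd hm (mySplit_ne_nil cs)
        | cons hh tl => simp [prependHead]
      rw [hpre]
      simp only [mySplit, reduceIte, prependHead, List.append_nil, List.map_cons]
      cases hm : mySplit cs with
      | nil => exact absurd hm (mySplit_ne_nil cs)
      | cons hh tl =>
        rw [List.map_cons, PySem.Chars.join_cons_cons]
        rw [emitB_append word res]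
        simp [List.append_assoc]
    · simp only [scanB]
      rw [if_neg hc, ih res (word ++ [ch])]
      congr 2
      simp only [mySplit, hc, if_false]
      cases hm : mySplit cs with
      | nil => exact absurd hm (mySplit_ne_nil cs)
      | cons hh tl => simp [prependHead]

-- xs[a:-1] for a natural start is drop-then-dropLast (the shape A's slice takes)
theorem slice_neg_one_end (xs : List Char) (a : Nat) :
    PySem.List.slice xs (some (a:Int)) (some (-1)) = (xs.drop a).dropLast := by
  simp only [PySem.List.slice, Int.reduceNeg, Order.lt_one_iff, PySem.List.clampIdx_neg_ofNat,
    Nat.cast_nonneg, PySem.List.clampIdx_of_nonneg, Int.toNat_natCast]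
  by_cases h : a ≤ xs.length
  · rw [min_eq_left h, List.dropLast_eq_take, List.length_drop]
    congr 1; omega
  · rw [min_eq_right (by omega), List.drop_of_length_le (by omega), List.drop_of_length_le (by omega)]
    simp

theorem pyRange_self (a : Int) : PySem.List.pyRange a a = [] := by simp [PySem.List.pyRange]

theorem dropLast_drop_comm (xs : List Char) (a : Nat) :
    (xs.drop a).dropLast = xs.dropLast.drop a := by
  rw [List.dropLast_eq_take, List.dropLast_eq_take, List.drop_take, List.length_drop]
  congr 1; omega

-- the per-word encoders agree on every nonempty word
theorem encWord_eq (el : List Char) (h : el ≠ []) : encAWord el = emitB el [] := by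
  match el with
  | [] => exact absurd rfl h
  | [c] =>
    simp [encAWord, emitB, PySem.List.len_eq]
  | [c, d] =>
    simp [encAWord, emitB, PySem.List.len_eq]
    have h12 : PySem.List.pyRange (1:Int) 2 = [1] := by decide
    rw [h12]
    simp only [List.map_cons, List.map_nil, reduceIte, List.flatten]
    rw [PySem.List.pyGetD_eq_getElem [c, d] ' ' (by norm_num) (by norm_num)]
    simp
  | c :: d :: e :: rest =>
    have hne : (e :: rest) ≠ [] := by simp
    have hA : encAWord (c :: d :: e :: rest)
        = PySem.Int.toChars (c.toNat : Int) ++ [(e :: rest).getLast hne]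
          ++ ((c :: d :: e :: rest).drop 2).dropLast ++ [d] := by
      have hg1 : PySem.List.pyGet? (c :: d :: e :: rest) 1 = some d := by
        rw [show (1:Int) = ((1:Nat):Int) by norm_num, PySem.List.pyGet?_natCast]; rfl
      have hglast : (e :: rest).getLast? = some ((e :: rest).getLast hne) :=
        List.getLast?_eq_some_getLast _
      have h2 : PySem.List.slice (c :: d :: e :: rest) (some 2) (some (-1))
          = ((c :: d :: e :: rest).drop 2).dropLast := slice_neg_one_end _ 2
      simp [encAWord, PySem.List.pyGet?_neg_one, PySem.List.pyGet?_zero_cons, hg1, hglast, h2]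
    have hB : emitB (c :: d :: e :: rest) []
        = PySem.Int.toChars (c.toNat : Int) ++ [(e :: rest).getLast hne]
          ++ (c :: d :: e :: rest).dropLast.drop 2 ++ [d] := by
      set w : List Char := c :: d :: e :: rest with hw
      have hwlen : w.length = rest.length + 3 := by simp [hw]
      set m : Nat := rest.length with hm
      have hn : PySem.List.len w = ((m : Int) + 3) := by simp [PySem.List.len_eq, hwlen]
      have hsplit : PySem.List.pyRange 1 ((m : Int) + 3)
          = [1] ++ PySem.List.pyRange 2 ((m : Int) + 2) ++ [((m : Int) + 2)] := by
        rw [PySem.List.pyRange_one_append 1 ((m:Int)+2) ((m:Int)+3) (by omega) (by omega),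
            PySem.List.pyRange_one_append 1 2 ((m:Int)+2) (by omega) (by omega)]
        rw [PySem.List.pyRange_one_cons (a := ((m:Int)+2)) (by omega)]
        have h12 : PySem.List.pyRange (1:Int) 2 = [1] := by decide
        have h23 : (m:Int) + 2 + 1 = (m:Int) + 3 := by ring
        rw [h12, h23, pyRange_self]
      have hfirst : PySem.List.pyGetD w ((m:Int) + 3 - 1) ' ' = (e :: rest).getLast hne := by
        have hc : ((m:Int) + 3 - 1) = ((m + 2 : Nat) : Int) := by push_cast; ring
        rw [hc, PySem.List.pyGetD_natCast, List.getD_eq_getElem w ' ' (by omega)]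
        rw [show (e :: rest).getLast hne = w.getLast (by simp [hw]) by
          simp [hw, List.getLast_cons]]
        rw [List.getLast_eq_getElem]
        congr 1
      have hlast : PySem.List.pyGetD w 1 ' ' = d := by
        rw [show (1:Int) = ((1:Nat):Int) by norm_num, PySem.List.pyGetD_natCast]
        simp [hw]
      have hdl : PySem.List.len w.dropLast = ((m:Int) + 2) := by
        simp [PySem.List.len_eq, hwlen]
      have hmid0 : List.map (fun i => PySem.List.pyGetD w.dropLast i ' ')
            (PySem.List.pyRange 2 ((m:Int)+2)) = w.dropLast.drop 2 := by
        have hfold := PySem.List.foldl_pyRange_pyGetD w.dropLast ' '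
          (fun acc x => acc ++ [x]) ([] : List Char) (a := 2) (by norm_num)
        rw [hdl] at hfold
        simp only [PySem.List.foldl_append_singleton_eq_map, List.nil_append] at hfold
        simpa using hfold
      have hmid : List.map (fun i => PySem.List.pyGetD w
            (if i = 1 then (m:Int) + 3 - 1 else if i = (m:Int) + 3 - 1 then 1 else i) ' ')
            (PySem.List.pyRange 2 ((m:Int)+2))
          = w.dropLast.drop 2 := by
        rw [← hmid0]
        apply List.map_congr_left
        intro i hi
        rw [PySem.List.mem_pyRange_one] at hi
        rw [if_neg (by omega), if_neg (by omega)]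
        rw [PySem.List.pyGetD_eq_getElem w ' ' (by omega) (by rw [hwlen]; push_cast; omega),
            PySem.List.pyGetD_eq_getElem w.dropLast ' ' (by omega)
              (by simp only [List.length_dropLast, hwlen]; push_cast; omega)]
        exact (List.getElem_dropLast _).symm
      have hg0 : PySem.List.pyGet? w 0 = some c := by
        rw [hw]; exact PySem.List.pyGet?_zero_cons _ _
      simp only [emitB, hg0]
      rw [hn, hsplit]
      simp only [PySem.List.foldl_append_singleton_eq_map, List.map_append, List.map_cons,
        List.map_nil]
      rw [hmid]
      simp only [reduceIte]
      rw [if_neg (show ¬((m:Int)+2 = 1) by omega), if_pos (show (m:Int)+2 = (m:Int)+3-1 by ring)]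
      rw [hfirst, hlast]
      simp [List.append_assoc]
    rw [hA, hB, dropLast_drop_comm]

-- ===== VERDICT (by name: the statement is the Claim_ definition above) =====
theorem encrypt_this_spec : Claim_equal_encrypt_this := by
  intro t _ hpre
  unfold Spec_encrypt_this encrypt_this encrypt_this_alt
  by_cases ht : t = ""
  · simp [ht]
  · rw [if_neg (by simpa using ht), if_neg (by simpa using ht)]
    rcases hpre with h | h
    · exact absurd h ht
    · simp only [PySem.Chars.split?, List.isEmpty_cons, Option.getD_some, if_false,
        Bool.false_eq_true] at h ⊢
      rw [splitOn_space] at h ⊢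
      simp only [PySem.List.foldl_append_singleton_eq_map, List.nil_append]
      rw [scan_spec]
      have hpre0 : prependHead [] (mySplit t.toList) = mySplit t.toList := by
        cases hm : mySplit t.toList with
        | nil => exact absurd hm (mySplit_ne_nil t.toList)
        | cons hh tl => simp [prependHead]
      rw [hpre0, List.nil_append]
      congr 2
      exact List.map_congr_left fun w hw => encWord_eq w (h w hw)
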